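-- pv_equiv track=rewrite | github.com/kanyaandrea/Exercises | Basic_exercises11-20.py | sentence_to_string
-- ===== SOURCE A (Python) =====
-- def sentence_to_string(sentence):
--     # sentence = string.lower()
--     string_sentence = []
--     exept = [".", "?", ",", "!", " "]
--     for item in sentence:
--         if item not in exept:
--             string_sentence.append(item)
--     joined_sentence = "".join(string_sentence)
--     return joined_sentence
-- ===== SOURCE B (Python) =====
-- def sentence_to_string(sentence):
--     for ch in [".", "?", ",", "!", " "]:
--         sentence = sentence.replace(ch, "")
--     return sentence
-- ===== Notes on version B (the rewrite author's own statement) =====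
-- stated objective: idiomatic
-- what changed: Replaced the character-by-character membership-filter loop that builds a list and joins it with a loop over the five delimiters deleting each via str.replace.
import Mathlib
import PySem

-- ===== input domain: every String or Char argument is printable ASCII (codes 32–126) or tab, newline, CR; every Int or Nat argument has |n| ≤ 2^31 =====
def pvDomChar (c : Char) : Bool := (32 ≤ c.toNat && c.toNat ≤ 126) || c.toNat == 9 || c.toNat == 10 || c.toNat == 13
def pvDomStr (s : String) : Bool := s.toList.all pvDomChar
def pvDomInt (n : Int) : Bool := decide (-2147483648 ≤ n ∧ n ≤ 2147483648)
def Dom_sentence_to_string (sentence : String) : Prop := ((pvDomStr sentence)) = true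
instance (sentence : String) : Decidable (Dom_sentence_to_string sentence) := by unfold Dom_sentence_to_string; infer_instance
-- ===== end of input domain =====

-- B deletes each of the five delimiters with str.replace instead of filtering the characters by a membership test (idiomatic decomposition, same cost).

-- ===== PORT A =====
-- for item in sentence: if item not in exept: string_sentence.append(item);  return "".join(string_sentence)
def sentence_to_string (sentence : String) : String :=
  let exept : List Char := ['.', '?', ',', '!', ' ']
  let string_sentence : List Char :=
    sentence.toList.foldl (fun acc item => if item ∉ exept then acc ++ [item] else acc) []
  String.ofList string_sentence

-- ===== PORT B =====
-- for ch in [".", "?", ",", "!", " "]: sentence = sentence.replace(ch, "");  return sentence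
def sentence_to_string_alt (sentence : String) : String :=
  [".", "?", ",", "!", " "].foldl (fun s ch => PySem.Str.replace s ch "") sentence

-- ===== PRECONDITION & SPEC =====
def Spec_sentence_to_string (sentence : String) (out : String) : Prop := out = sentence_to_string_alt sentence
instance (sentence : String) (out : String) : Decidable (Spec_sentence_to_string sentence out) := by unfold Spec_sentence_to_string; infer_instance

-- ===== CLAIM (what is proved, stated in full; the proofs are below) =====
def Claim_equal_sentence_to_string : Prop := ∀ (sentence : String), Dom_sentence_to_string sentence → Spec_sentence_to_string sentence (sentence_to_string sentence)

-- ===== LEMMAS AND PROOFS =====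

/-- `replace.go` with a one-character pattern and empty replacement filters that character out. -/
theorem replace_go_single (c : Char) (l acc : List Char) (fuel : Nat) (h : l.length ≤ fuel) :
    PySem.Chars.replace.go [c] [] fuel l acc = acc.reverse ++ l.filter (fun x => x ≠ c) := by
  induction l generalizing fuel acc with
  | nil => cases fuel <;> simp [PySem.Chars.replace.go]
  | cons hd tl ih =>
    cases fuel with
    | zero => simp at h
    | succ f =>
      simp only [List.length_cons, Nat.succ_le_succ_iff] at h
      by_cases hc : hd = c
      · subst hc
        simp [PySem.Chars.replace.go, List.isPrefixOf, ih _ _ h]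
      · have hpre : List.isPrefixOf [c] (hd :: tl) = false := by
          simp [List.isPrefixOf]; exact fun he => (hc he.symm).elim
        simp [PySem.Chars.replace.go, hpre, ih _ _ h, hc]

/-- Replacing a single character by the empty string is filtering it out. -/
theorem replace_single (c : Char) (l : List Char) :
    PySem.Chars.replace l [c] [] = l.filter (fun x => x ≠ c) := by
  simp [PySem.Chars.replace, replace_go_single c l [] l.length le_rfl]

-- ===== VERDICT (by name: the statement is the Claim_ definition above) =====
theorem sentence_to_string_spec : Claim_equal_sentence_to_string := by
  intro sentence _
  unfold Spec_sentence_to_string sentence_to_string sentence_to_string_alt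
  simp only [List.foldl_cons, List.foldl_nil, PySem.Str.replace]
  have htl : ∀ l : List Char, (String.ofList l).toList = l := by simp
  simp only [show ".".toList = ['.'] from rfl, show "?".toList = ['?'] from rfl,
    show ",".toList = [','] from rfl, show "!".toList = ['!'] from rfl,
    show " ".toList = [' '] from rfl, show "".toList = [] from rfl,
    htl, replace_single, List.filter_filter]
  simp only [PySem.List.foldl_append_ite_eq_filter, List.nil_append]
  congr 1
  apply List.filter_congr
  intro x _
  simp only [List.mem_cons, List.not_mem_nil, or_false, not_or, ne_eq, ← Bool.decide_and]
  rw [decide_eq_decide]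
  exact ⟨fun ⟨a,b,c,d,e⟩ => ⟨e,d,c,b,a⟩, fun ⟨a,b,c,d,e⟩ => ⟨e,d,c,b,a⟩⟩
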